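-- pv_equiv track=rewrite | github.com/CaroChoch/holbertonschool-machine_learning | supervised_learning/nlp_metrics/2-cumulative_bleu.py | calculate_clipped_counts
-- ===== SOURCE A (Python) =====
-- def calculate_clipped_counts(sentence_ngrams, reference_ngrams):
--     """Calculate clipped counts for a given sentence and references."""
--     clipped_counts = {}
--     for ngram, count in sentence_ngrams.items():
--         max_ref_count = 0
--         for ref_ngram in reference_ngrams:
--             if ngram in ref_ngram:
--                 max_ref_count = max(max_ref_count, ref_ngram[ngram])
--         clipped_counts[ngram] = min(count, max_ref_count)
--     return clipped_counts
-- ===== SOURCE B (Python) =====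
-- def calculate_clipped_counts(sentence_ngrams, reference_ngrams):
--     """Calculate clipped counts for a given sentence and references."""
--     # Pass 1: merge all references into one table of per-ngram maximum counts.
--     max_ref_counts = {}
--     for ref_ngram in reference_ngrams:
--         for ng, c in ref_ngram.items():
--             max_ref_counts[ng] = max(max_ref_counts.get(ng, 0), c)
--     # Pass 2: clip each sentence n-gram count by a single O(1) table lookup.
--     clipped_counts = {}
--     for ngram, count in sentence_ngrams.items():
--         clipped_counts[ngram] = min(count, max_ref_counts.get(ngram, 0))
--     return clipped_counts
-- ===== Notes on version B (the rewrite author's own statement) =====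
-- stated objective: faster
-- what changed: B replaces A's per-sentence-ngram rescan of every reference dict by two sequential passes: one pass merges all references into a single max-count table, then one pass clips each sentence count with an O(1) lookup; Pre_ only states dict well-formedness (distinct keys within each reference association list), which every Python dict satisfies.
import Mathlib
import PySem

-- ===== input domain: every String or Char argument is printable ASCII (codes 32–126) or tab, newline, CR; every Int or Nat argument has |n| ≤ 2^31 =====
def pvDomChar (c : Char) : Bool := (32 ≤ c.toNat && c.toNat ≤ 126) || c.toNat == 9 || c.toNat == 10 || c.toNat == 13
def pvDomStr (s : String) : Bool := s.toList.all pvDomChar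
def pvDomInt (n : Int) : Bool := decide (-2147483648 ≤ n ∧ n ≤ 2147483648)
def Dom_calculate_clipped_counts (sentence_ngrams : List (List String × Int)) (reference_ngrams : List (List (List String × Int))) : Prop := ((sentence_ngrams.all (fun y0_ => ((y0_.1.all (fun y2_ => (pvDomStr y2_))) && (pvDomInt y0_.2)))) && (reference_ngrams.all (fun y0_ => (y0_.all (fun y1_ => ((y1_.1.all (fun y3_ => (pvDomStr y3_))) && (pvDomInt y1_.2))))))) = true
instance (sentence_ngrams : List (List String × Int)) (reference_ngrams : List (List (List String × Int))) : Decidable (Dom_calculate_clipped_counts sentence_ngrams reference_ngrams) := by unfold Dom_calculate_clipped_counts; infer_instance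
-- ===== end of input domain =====

-- B replaces A's per-sentence-ngram rescan of all references with one merged max-count table
-- built in a single pass, followed by one O(1)-lookup clipping pass (faster: asymptotic).

-- ===== PORT A =====
-- inner loop: 'for ref_ngram in reference_ngrams: if ngram in ref_ngram: max_ref_count = max(max_ref_count, ref_ngram[ngram])'
def pvMaxRefA (reference_ngrams : List (List (List String × Int))) (ngram : List String) : Int :=
  reference_ngrams.foldl (fun max_ref_count ref_ngram =>
    match (PySem.Dict.mk ref_ngram).get? ngram with
    | some v => max max_ref_count v
    | none => max_ref_count) 0

def calculate_clipped_counts (sentence_ngrams : List (List String × Int)) (reference_ngrams : List (List (List String × Int))) : List (List String × Int) :=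
  (sentence_ngrams.foldl (fun clipped_counts p =>
    clipped_counts.insert p.1 (min p.2 (pvMaxRefA reference_ngrams p.1)))
    (PySem.Dict.empty : PySem.Dict (List String) Int)).items

-- ===== PORT B =====
def calculate_clipped_counts_alt (sentence_ngrams : List (List String × Int)) (reference_ngrams : List (List (List String × Int))) : List (List String × Int) :=
  -- pass 1: merged max-count table over all reference entries
  let max_ref_counts : PySem.Dict (List String) Int :=
    reference_ngrams.foldl (fun t ref_ngram =>
      ref_ngram.foldl (fun t p => t.insert p.1 (max (t.getD p.1 0) p.2)) t)
      PySem.Dict.empty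
  -- pass 2: clip each sentence count by one table lookup
  (sentence_ngrams.foldl (fun clipped_counts p =>
    clipped_counts.insert p.1 (min p.2 (max_ref_counts.getD p.1 0)))
    (PySem.Dict.empty : PySem.Dict (List String) Int)).items

-- ===== PRECONDITION & SPEC =====
-- Pre_ states only dict well-formedness: each reference association list has pairwise-distinct
-- keys, as every Python dict does (with a duplicated key inside one reference, A reads the first
-- occurrence while B merges all occurrences; no Python dict input reaches that case).
def Pre_calculate_clipped_counts (sentence_ngrams : List (List String × Int)) (reference_ngrams : List (List (List String × Int))) : Prop :=
  ∀ ref ∈ reference_ngrams, (ref.map Prod.fst).Nodup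
instance (sentence_ngrams : List (List String × Int)) (reference_ngrams : List (List (List String × Int))) : Decidable (Pre_calculate_clipped_counts sentence_ngrams reference_ngrams) := by unfold Pre_calculate_clipped_counts; infer_instance

def pvWitness_calculate_clipped_counts : (List (List String × Int)) × (List (List (List String × Int))) :=
  ([(["the", "cat"], 2), (["cat", "sat"], 1)],
   [[(["the", "cat"], 1)], [(["the", "cat"], 3), (["on", "the"], 1)]])

def Spec_calculate_clipped_counts (sentence_ngrams : List (List String × Int)) (reference_ngrams : List (List (List String × Int))) (out : List (List String × Int)) : Prop := out = calculate_clipped_counts_alt sentence_ngrams reference_ngrams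
instance (sentence_ngrams : List (List String × Int)) (reference_ngrams : List (List (List String × Int))) (out : List (List String × Int)) : Decidable (Spec_calculate_clipped_counts sentence_ngrams reference_ngrams out) := by unfold Spec_calculate_clipped_counts; infer_instance

-- ===== CLAIM (what is proved, stated in full; the proofs are below) =====
def Claim_equal_calculate_clipped_counts : Prop := ∀ (sentence_ngrams : List (List String × Int)) (reference_ngrams : List (List (List String × Int))), Dom_calculate_clipped_counts sentence_ngrams reference_ngrams → Pre_calculate_clipped_counts sentence_ngrams reference_ngrams → Spec_calculate_clipped_counts sentence_ngrams reference_ngrams (calculate_clipped_counts sentence_ngrams reference_ngrams)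

-- ===== LEMMAS AND PROOFS =====

-- folding one reference with nodup keys into the table: the lookup at ng gains exactly
-- 'max · v' when (ng, v) is that reference's binding, and is unchanged otherwise
lemma pvTable_one_ref (ref : List (List String × Int)) (t : PySem.Dict (List String) Int)
    (ng : List String) (hnd : (ref.map Prod.fst).Nodup) :
    (ref.foldl (fun t p => t.insert p.1 (max (t.getD p.1 0) p.2)) t).getD ng 0 =
      match (PySem.Dict.mk ref).get? ng with
      | some v => max (t.getD ng 0) v
      | none => t.getD ng 0 := by
  induction ref generalizing t with
  | nil => simp [PySem.Dict.get?]
  | cons hd tl ih =>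
    obtain ⟨k, v⟩ := hd
    simp only [List.map_cons, List.nodup_cons] at hnd
    simp only [List.foldl_cons, PySem.Dict.get?_mk_cons]
    by_cases hk : k = ng
    · subst hk
      rw [ih _ hnd.2]
      have hnone : (PySem.Dict.mk tl).get? k = none := by
        rw [PySem.Dict.get?_eq_none_iff_not_mem_keys]
        simpa [PySem.Dict.keys] using hnd.1
      simp [hnone]
    · rw [ih _ hnd.2]
      have hne : ng ≠ k := fun h => hk h.symm
      have hbe : (k == ng) = false := by simp [hk]
      simp [hbe, PySem.Dict.getD_insert, hne]

-- the merged table's lookup equals A's running max over the references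
lemma pvTable_lookup (reference_ngrams : List (List (List String × Int)))
    (t : PySem.Dict (List String) Int) (ng : List String)
    (hnd : ∀ ref ∈ reference_ngrams, (ref.map Prod.fst).Nodup) :
    (reference_ngrams.foldl (fun t ref =>
        ref.foldl (fun t p => t.insert p.1 (max (t.getD p.1 0) p.2)) t) t).getD ng 0 =
      reference_ngrams.foldl (fun m ref =>
        match (PySem.Dict.mk ref).get? ng with
        | some v => max m v
        | none => m) (t.getD ng 0) := by
  induction reference_ngrams generalizing t with
  | nil => rfl
  | cons hd tl ih =>
    simp only [List.foldl_cons]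
    rw [ih _ (fun r hr => hnd r (List.mem_cons_of_mem _ hr)),
        pvTable_one_ref hd t ng (hnd hd (List.mem_cons_self ..))]

-- ===== VERDICT (by name: the statement is the Claim_ definition above) =====
theorem calculate_clipped_counts_spec : Claim_equal_calculate_clipped_counts := by
  intro s r _ hpre
  unfold Spec_calculate_clipped_counts calculate_clipped_counts calculate_clipped_counts_alt
  have hval : ∀ ng : List String,
      pvMaxRefA r ng =
        (r.foldl (fun t ref =>
          ref.foldl (fun t p => t.insert p.1 (max (t.getD p.1 0) p.2)) t)
          (PySem.Dict.empty : PySem.Dict (List String) Int)).getD ng 0 := by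
    intro ng
    rw [pvTable_lookup r PySem.Dict.empty ng hpre]
    simp [pvMaxRefA, PySem.Dict.getD_empty]
  simp only [← hval]
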